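-- pv_equiv track=rewrite | github.com/arunkhattri/HackerRank | Algorithm/queens_attack.py | max_diag_right_up
-- ===== SOURCE A (Python) =====
-- def max_diag_right_up(row, col, dim):
--     move_count = 0
--     up_lim = dim + 1
--     # diagonal right up moves
--     dru_i, dru_j = row + 1, col + 1
--     while dru_i < up_lim and dru_j < up_lim:
--         move_count += 1
--         dru_i += 1
--         dru_j += 1
--     return move_count
-- ===== SOURCE B (Python) =====
-- def max_diag_right_up(row, col, dim):
--     return max(0, min(dim - row, dim - col))
-- ===== Notes on version B (the rewrite author's own statement) =====
-- stated objective: simpler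
-- what changed: Replaced the step-by-step diagonal walk loop with the closed form max(0, min(dim - row, dim - col)).
import Mathlib
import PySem

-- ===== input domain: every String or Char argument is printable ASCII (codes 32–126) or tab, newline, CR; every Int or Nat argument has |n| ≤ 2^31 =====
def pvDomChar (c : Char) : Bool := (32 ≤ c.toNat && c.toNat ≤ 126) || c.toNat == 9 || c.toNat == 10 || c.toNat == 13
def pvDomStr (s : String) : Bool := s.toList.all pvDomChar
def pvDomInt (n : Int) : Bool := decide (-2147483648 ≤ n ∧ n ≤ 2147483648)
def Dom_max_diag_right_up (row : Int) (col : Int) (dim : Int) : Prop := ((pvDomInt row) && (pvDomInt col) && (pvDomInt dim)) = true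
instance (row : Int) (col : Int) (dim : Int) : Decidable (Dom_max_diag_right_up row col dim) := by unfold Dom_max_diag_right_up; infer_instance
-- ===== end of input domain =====

-- B replaces A's step-by-step diagonal walk with the closed form max 0 (min (dim-row) (dim-col)) (simpler, O(1)).
-- ===== PORT A =====
-- while dru_i < up_lim and dru_j < up_lim: count += 1; dru_i += 1; dru_j += 1
def maxDiagLoop (i : Int) (j : Int) (lim : Int) (count : Int) : Int :=
  if i < lim ∧ j < lim then
    maxDiagLoop (i + 1) (j + 1) lim (count + 1)
  else
    count
termination_by (lim - i).toNat
decreasing_by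
  have : lim - (i + 1) < lim - i := by omega
  omega

def max_diag_right_up (row : Int) (col : Int) (dim : Int) : Int :=
  maxDiagLoop (row + 1) (col + 1) (dim + 1) 0

-- ===== PORT B =====
def max_diag_right_up_alt (row : Int) (col : Int) (dim : Int) : Int :=
  max 0 (min (dim - row) (dim - col))

-- ===== PRECONDITION & SPEC =====
def Spec_max_diag_right_up (row : Int) (col : Int) (dim : Int) (out : Int) : Prop := out = max_diag_right_up_alt row col dim
instance (row : Int) (col : Int) (dim : Int) (out : Int) : Decidable (Spec_max_diag_right_up row col dim out) := by unfold Spec_max_diag_right_up; infer_instance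

-- ===== CLAIM (what is proved, stated in full; the proofs are below) =====
def Claim_equal_max_diag_right_up : Prop := ∀ (row : Int) (col : Int) (dim : Int), Dom_max_diag_right_up row col dim → Spec_max_diag_right_up row col dim (max_diag_right_up row col dim)

-- ===== LEMMAS AND PROOFS =====
theorem maxDiagLoop_eq (lim : Int) : ∀ (n : Nat) (i j count : Int), (lim - i).toNat = n →
    maxDiagLoop i j lim count = count + max 0 (min (lim - i) (lim - j)) := by
  intro n
  induction n with
  | zero =>
    intro i j count h
    rw [maxDiagLoop]
    rw [if_neg (by omega : ¬ (i < lim ∧ j < lim))]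
    simp only [Int.min_def, Int.max_def]
    split_ifs <;> omega
  | succ k ih =>
    intro i j count h
    rw [maxDiagLoop]
    by_cases hc : i < lim ∧ j < lim
    · rw [if_pos hc]
      rw [ih (i+1) (j+1) (count+1) (by omega)]
      obtain ⟨h1, h2⟩ := hc
      simp only [Int.min_def, Int.max_def]
      split_ifs <;> omega
    · rw [if_neg hc]
      simp only [Int.min_def, Int.max_def]
      split_ifs <;> omega

-- ===== VERDICT (by name: the statement is the Claim_ definition above) =====
theorem max_diag_right_up_spec : Claim_equal_max_diag_right_up := by
  intro row col dim _
  unfold Spec_max_diag_right_up max_diag_right_up max_diag_right_up_alt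
  rw [maxDiagLoop_eq (dim + 1) ((dim + 1) - (row + 1)).toNat (row + 1) (col + 1) 0 rfl]
  omega
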